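-- pv_equiv track=rewrite | github.com/pakhomovee/basketballs | components/team_clustering/annotate.py | _find_clicked_bbox
-- ===== SOURCE A (Python) =====
-- def _point_in_bbox(x: int, y: int, bbox: list[int]) -> bool:
--     x1, y1, x2, y2 = bbox[:4]
--     return x1 <= x <= x2 and y1 <= y <= y2
--
-- def _find_clicked_bbox(x: int, y: int, bboxes: list[list[int]]) -> int | None:
--     """Return index of bbox containing (x, y), or None. Prefer smaller bboxes (closer)."""
--     candidates = []
--     for i, bbox in enumerate(bboxes):
--         if _point_in_bbox(x, y, bbox):
--             x1, y1, x2, y2 = bbox[:4]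
--             area = (x2 - x1) * (y2 - y1)
--             candidates.append((area, i))
--     if not candidates:
--         return None
--     candidates.sort(key=lambda t: t[0])
--     return candidates[0][1]
-- ===== SOURCE B (Python) =====
-- def _find_clicked_bbox(x: int, y: int, bboxes: list[list[int]]) -> int | None:
--     """Return index of bbox containing (x, y), or None. Prefer smaller bboxes (closer)."""
--     best_area = None
--     best_index = None
--     for i, bbox in enumerate(bboxes):
--         x1, y1, x2, y2 = bbox[:4]
--         if x1 <= x <= x2 and y1 <= y <= y2:
--             area = (x2 - x1) * (y2 - y1)
--             if best_area is None or area < best_area: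
--                 best_area = area
--                 best_index = i
--     return best_index
-- ===== Notes on version B (the rewrite author's own statement) =====
-- stated objective: simpler
-- what changed: Replaced collect-all-candidates-then-stable-sort with a single-pass running minimum (best_area/best_index updated on strict '<', so the earliest minimal-area bbox wins ties exactly like the stable sort).
import Mathlib
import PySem

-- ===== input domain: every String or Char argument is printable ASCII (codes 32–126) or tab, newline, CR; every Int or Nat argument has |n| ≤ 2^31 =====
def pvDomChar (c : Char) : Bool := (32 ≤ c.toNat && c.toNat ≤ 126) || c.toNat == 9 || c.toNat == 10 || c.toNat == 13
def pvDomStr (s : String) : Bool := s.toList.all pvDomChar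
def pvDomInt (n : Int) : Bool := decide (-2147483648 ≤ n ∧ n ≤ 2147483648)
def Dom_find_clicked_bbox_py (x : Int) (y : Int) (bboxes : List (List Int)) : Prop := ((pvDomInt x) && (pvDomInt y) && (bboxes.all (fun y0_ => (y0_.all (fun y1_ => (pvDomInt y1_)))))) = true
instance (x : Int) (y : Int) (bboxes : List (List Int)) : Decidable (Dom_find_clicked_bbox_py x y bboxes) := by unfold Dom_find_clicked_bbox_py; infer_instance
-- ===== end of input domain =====

-- B replaces A's collect-candidates-then-stable-sort with a single-pass running minimum
-- (strict '<' keeps the earliest minimal-area index, matching the stable sort's tie-break): simpler, one pass.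


-- ===== PORT A =====
-- x1, y1, x2, y2 = bbox[:4]  (none = ValueError: wrong number of values to unpack)
def pvUnpack4 (b : List Int) : Option (Int × Int × Int × Int) :=
  match PySem.List.slice b none (some 4) with
  | [x1, y1, x2, y2] => some (x1, y1, x2, y2)
  | _ => none

-- _point_in_bbox; none = the unpack raised
def point_in_bbox_py (x : Int) (y : Int) (bbox : List Int) : Option Bool :=
  match pvUnpack4 bbox with
  | none => none
  | some (x1, y1, x2, y2) => some ((decide (x1 ≤ x) && decide (x ≤ x2)) && (decide (y1 ≤ y) && decide (y ≤ y2)))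

-- the 'for i, bbox in enumerate(bboxes)' loop building candidates; outer none = an unpack raised
def findA_loop (x : Int) (y : Int) : List (Int × List Int) → List (Int × Int) → Option (List (Int × Int))
  | [], acc => some acc
  | (i, bbox) :: rest, acc =>
    match point_in_bbox_py x y bbox with
    | none => none
    | some false => findA_loop x y rest acc
    | some true =>
      match pvUnpack4 bbox with
      | none => none
      | some (x1, y1, x2, y2) => findA_loop x y rest (acc ++ [((x2 - x1) * (y2 - y1), i)])

def find_clicked_bbox_py (x : Int) (y : Int) (bboxes : List (List Int)) : Option Int :=
  match findA_loop x y (PySem.List.enumerate bboxes 0) [] with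
  | none => none   -- exception path; excluded by Pre_
  | some candidates =>
    if candidates = [] then none
    else
      match PySem.List.sorted candidates (fun t => t.1) false with
      | [] => none
      | c :: _ => some c.2

-- ===== PORT B =====
-- running best (area, index); outer none = an unpack raised
def findB_loop (x : Int) (y : Int) : List (Int × List Int) → Option (Int × Int) → Option (Option (Int × Int))
  | [], best => some best
  | (i, bbox) :: rest, best =>
    match pvUnpack4 bbox with
    | none => none
    | some (x1, y1, x2, y2) =>
      if (decide (x1 ≤ x) && decide (x ≤ x2)) && (decide (y1 ≤ y) && decide (y ≤ y2)) then
        let area := (x2 - x1) * (y2 - y1)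
        match best with
        | none => findB_loop x y rest (some (area, i))
        | some (ba, bi) =>
          if area < ba then findB_loop x y rest (some (area, i))
          else findB_loop x y rest (some (ba, bi))
      else findB_loop x y rest best

def find_clicked_bbox_py_alt (x : Int) (y : Int) (bboxes : List (List Int)) : Option Int :=
  match findB_loop x y (PySem.List.enumerate bboxes 0) none with
  | none => none
  | some best => best.map (·.2)

-- ===== PRECONDITION & SPEC =====
-- Pre_ excludes exactly the inputs where some bbox has fewer than 4 entries: there Python A
-- (and Python B alike) raises ValueError at the 4-tuple unpack, for every bbox in the list.
def Pre_find_clicked_bbox_py (x : Int) (y : Int) (bboxes : List (List Int)) : Prop :=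
  ∀ b ∈ bboxes, 4 ≤ b.length
instance (x : Int) (y : Int) (bboxes : List (List Int)) : Decidable (Pre_find_clicked_bbox_py x y bboxes) := by unfold Pre_find_clicked_bbox_py; infer_instance

def pvWitness_find_clicked_bbox_py : Int × Int × List (List Int) :=
  (1, 1, [[0, 0, 5, 5], [0, 0, 2, 2]])

def Spec_find_clicked_bbox_py (x : Int) (y : Int) (bboxes : List (List Int)) (out : Option Int) : Prop := out = find_clicked_bbox_py_alt x y bboxes
instance (x : Int) (y : Int) (bboxes : List (List Int)) (out : Option Int) : Decidable (Spec_find_clicked_bbox_py x y bboxes out) := by unfold Spec_find_clicked_bbox_py; infer_instance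

-- ===== CLAIM (what is proved, stated in full; the proofs are below) =====
def Claim_equal_find_clicked_bbox_py : Prop := ∀ (x : Int) (y : Int) (bboxes : List (List Int)), Dom_find_clicked_bbox_py x y bboxes → Pre_find_clicked_bbox_py x y bboxes → Spec_find_clicked_bbox_py x y bboxes (find_clicked_bbox_py x y bboxes)

-- ===== LEMMAS AND PROOFS =====

-- the candidates list, as a filterMap (proof-only characterisation)
def pvCands (x : Int) (y : Int) (l : List (Int × List Int)) : List (Int × Int) :=
  l.filterMap (fun p =>
    match pvUnpack4 p.2 with
    | none => none
    | some (x1, y1, x2, y2) =>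
      if (decide (x1 ≤ x) && decide (x ≤ x2)) && (decide (y1 ≤ y) && decide (y ≤ y2)) then
        some ((x2 - x1) * (y2 - y1), p.1)
      else none)

-- the running-min step on (area, index) pairs
def pvMinStep (o : Option (Int × Int)) (c : Int × Int) : Option (Int × Int) :=
  match o with
  | none => some c
  | some h => if c.1 < h.1 then some c else some h

lemma pvUnpack4_of_len {b : List Int} (h : 4 ≤ b.length) :
    ∃ q, pvUnpack4 b = some q := by
  match b, h with
  | a :: c :: d :: e :: t, _ =>
    refine ⟨(a, c, d, e), ?_⟩
    rw [pvUnpack4, PySem.List.slice_to _ (by norm_num)]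
    simp

lemma findA_loop_eq (x y : Int) (l : List (Int × List Int))
    (h : ∀ p ∈ l, 4 ≤ p.2.length) (acc : List (Int × Int)) :
    findA_loop x y l acc = some (acc ++ pvCands x y l) := by
  induction l generalizing acc with
  | nil => simp [findA_loop, pvCands]
  | cons p rest ih =>
    obtain ⟨i, bbox⟩ := p
    obtain ⟨⟨x1, y1, x2, y2⟩, hq⟩ := pvUnpack4_of_len (h (i, bbox) (by simp))
    have hrest : ∀ p ∈ rest, 4 ≤ p.2.length := fun p hp => h p (by simp [hp])
    by_cases hc : ((x1 ≤ x ∧ x ≤ x2) ∧ (y1 ≤ y ∧ y ≤ y2))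
    · simp [findA_loop, point_in_bbox_py, hq, hc.1.1, hc.1.2, hc.2.1, hc.2.2,
        ih hrest, pvCands]
    · have hcb : (decide (x1 ≤ x) && decide (x ≤ x2) && (decide (y1 ≤ y) && decide (y ≤ y2))) = false := by
        simp only [Bool.and_eq_false_iff, decide_eq_false_iff_not]
        tauto
      simp [findA_loop, point_in_bbox_py, hq, hcb, ih hrest, pvCands, hc]

lemma findB_loop_eq (x y : Int) (l : List (Int × List Int))
    (h : ∀ p ∈ l, 4 ≤ p.2.length) (best : Option (Int × Int)) :
    findB_loop x y l best = some ((pvCands x y l).foldl pvMinStep best) := by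
  induction l generalizing best with
  | nil => simp [findB_loop, pvCands]
  | cons p rest ih =>
    obtain ⟨i, bbox⟩ := p
    obtain ⟨⟨x1, y1, x2, y2⟩, hq⟩ := pvUnpack4_of_len (h (i, bbox) (by simp))
    have hrest : ∀ p ∈ rest, 4 ≤ p.2.length := fun p hp => h p (by simp [hp])
    by_cases hc : ((x1 ≤ x ∧ x ≤ x2) ∧ (y1 ≤ y ∧ y ≤ y2))
    · cases best with
      | none =>
        simp [findB_loop, hq, hc.1.1, hc.1.2, hc.2.1, hc.2.2, ih hrest, pvCands, pvMinStep]
      | some h' =>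
        obtain ⟨ba, bi⟩ := h'
        by_cases ha : (x2 - x1) * (y2 - y1) < ba
        · simp [findB_loop, hq, hc.1.1, hc.1.2, hc.2.1, hc.2.2, ha, ih hrest, pvCands, pvMinStep]
        · simp [findB_loop, hq, hc.1.1, hc.1.2, hc.2.1, hc.2.2, ha, ih hrest, pvCands, pvMinStep]
    · have hcb : (decide (x1 ≤ x) && decide (x ≤ x2) && (decide (y1 ≤ y) && decide (y ≤ y2))) = false := by
        simp only [Bool.and_eq_false_iff, decide_eq_false_iff_not]
        tauto
      simp [findB_loop, hq, hcb, ih hrest, pvCands, hc]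

lemma head?_insertBy (x : Int × Int) (ys : List (Int × Int)) :
    (PySem.List.insertBy (fun a b => decide (a.1 < b.1)) x ys).head? = pvMinStep ys.head? x := by
  cases ys with
  | nil => simp [PySem.List.insertBy, pvMinStep]
  | cons y t =>
    by_cases h : x.1 < y.1
    · simp [PySem.List.insertBy, pvMinStep, h]
    · simp [PySem.List.insertBy, pvMinStep, h]

lemma head?_foldl_insertBy (l ys : List (Int × Int)) :
    (l.foldl (fun acc c => PySem.List.insertBy (fun a b => decide (a.1 < b.1)) c acc) ys).head?
      = l.foldl pvMinStep ys.head? := by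
  induction l generalizing ys with
  | nil => rfl
  | cons c t ih => simp [List.foldl_cons, ih, head?_insertBy]

lemma head?_sorted (l : List (Int × Int)) :
    (PySem.List.sorted l (fun t => t.1) false).head? = l.foldl pvMinStep none := by
  rw [PySem.List.sorted_eq_foldl_insertBy]
  simpa using head?_foldl_insertBy l []

-- ===== VERDICT (by name: the statement is the Claim_ definition above) =====
theorem find_clicked_bbox_py_spec : Claim_equal_find_clicked_bbox_py := by
  intro x y bboxes _ hpre
  unfold Spec_find_clicked_bbox_py
  have hl : ∀ p ∈ PySem.List.enumerate bboxes (0 : Int), 4 ≤ p.2.length := by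
    intro p hp
    have hm : p.2 ∈ (PySem.List.enumerate bboxes (0 : Int)).map (·.2) :=
      List.mem_map_of_mem hp
    rw [PySem.List.map_snd_enumerate] at hm
    exact hpre _ hm
  unfold find_clicked_bbox_py find_clicked_bbox_py_alt
  rw [findA_loop_eq x y _ hl, findB_loop_eq x y _ hl]
  set cands := pvCands x y (PySem.List.enumerate bboxes 0) with hc
  cases hce : cands with
  | nil => simp
  | cons c t =>
    have hnil : cands ≠ [] := by simp [hce]
    have hhead := head?_sorted cands
    cases hs : PySem.List.sorted cands (fun t => t.1) false with
    | nil =>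
      exfalso
      have := PySem.List.sorted_perm (xs := cands) (key := fun t => t.1) (rev := false)
      rw [hs] at this
      exact hnil (List.Perm.nil_eq this).symm
    | cons m mt =>
      rw [hs] at hhead
      simp only [List.head?_cons] at hhead
      rw [← hce]
      show (if cands = [] then none
            else match PySem.List.sorted cands (fun t => t.1) false with
                 | [] => none
                 | c :: _ => some c.2)
          = Option.map (fun x => x.2) (List.foldl pvMinStep none cands)
      rw [if_neg hnil, hs, ← hhead]
      rfl
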